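-- pv_equiv track=rewrite | github.com/TheRedEnd2000/AdvancedHunt | scripts/message_key_audit.py | _mask_java_comments
-- ===== SOURCE A (Python) =====
-- def _mask_java_comments(text: str) -> str:
--     """Return a same-length string with Java comments replaced by spaces."""
--     out = list(text)
--     in_string = False
--     in_char = False
--     escaped = False
--     in_line_comment = False
--     in_block_comment = False
--
--     i = 0
--     while i < len(out):
--         ch = out[i]
--
--         if in_line_comment:
--             if ch == "\n":
--                 in_line_comment = False
--                 i += 1
--                 continue
--             out[i] = " "
--             i += 1
--             continue
--
--         if in_block_comment:
--             if ch == "*" and i + 1 < len(out) and out[i + 1] == "/":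
--                 out[i] = " "
--                 out[i + 1] = " "
--                 in_block_comment = False
--                 i += 2
--                 continue
--             if ch != "\n":
--                 out[i] = " "
--             i += 1
--             continue
--
--         if in_string:
--             if escaped:
--                 escaped = False
--             elif ch == "\\":
--                 escaped = True
--             elif ch == '"':
--                 in_string = False
--             i += 1
--             continue
--
--         if in_char:
--             if escaped:
--                 escaped = False
--             elif ch == "\\":
--                 escaped = True
--             elif ch == "'":
--                 in_char = False
--             i += 1
--             continue
--
--         if ch == '"':
--             in_string = True
--             i += 1
--             continue
--         if ch == "'":
--             in_char = True
--             i += 1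
--             continue
--
--         if ch == "/" and i + 1 < len(out):
--             nxt = out[i + 1]
--             if nxt == "/":
--                 out[i] = " "
--                 out[i + 1] = " "
--                 in_line_comment = True
--                 i += 2
--                 continue
--             if nxt == "*":
--                 out[i] = " "
--                 out[i + 1] = " "
--                 in_block_comment = True
--                 i += 2
--                 continue
--
--         i += 1
--
--     return "".join(out)
-- ===== SOURCE B (Python) =====
-- def _mask_java_comments(text: str) -> str:
--     """Return a same-length string with Java comments replaced by spaces."""
--     n = len(text)
--     parts = []
--     i = 0
--     while i < n:
--         c = text[i]
--         if c == '"' or c == "'":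
--             j = _skip_literal(text, i + 1, c)
--             parts.append(text[i:j])
--             i = j
--         elif c == '/' and text.startswith('//', i):
--             j = text.find('\n', i + 2)
--             if j == -1:
--                 j = n
--             parts.append(' ' * (j - i))
--             i = j
--         elif c == '/' and text.startswith('/*', i):
--             j = text.find('*/', i + 2)
--             end = n if j == -1 else j + 2
--             parts.append(''.join('\n' if ch == '\n' else ' ' for ch in text[i:end]))
--             i = end
--         else:
--             parts.append(c)
--             i += 1
--     return ''.join(parts)
--
--
-- def _skip_literal(text, i, quote):
--     # index just past the closing quote (escape-aware), or past the end
--     n = len(text)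
--     while i < n:
--         ch = text[i]
--         if ch == '\\':
--             i += 2
--         elif ch == quote:
--             return i + 1
--         else:
--             i += 1
--     return i
-- ===== Notes on version B (the rewrite author's own statement) =====
-- stated objective: alternative
-- what changed: Replaced A's character-at-a-time scanner with five boolean mode flags by a token scanner that, at each position, consumes a whole string/char literal (escape-aware, via a skip helper), a whole // comment (find the newline), or a whole /* */ comment (find the closing */) in one step and emits the verbatim or space-masked segment.
import Mathlib
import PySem

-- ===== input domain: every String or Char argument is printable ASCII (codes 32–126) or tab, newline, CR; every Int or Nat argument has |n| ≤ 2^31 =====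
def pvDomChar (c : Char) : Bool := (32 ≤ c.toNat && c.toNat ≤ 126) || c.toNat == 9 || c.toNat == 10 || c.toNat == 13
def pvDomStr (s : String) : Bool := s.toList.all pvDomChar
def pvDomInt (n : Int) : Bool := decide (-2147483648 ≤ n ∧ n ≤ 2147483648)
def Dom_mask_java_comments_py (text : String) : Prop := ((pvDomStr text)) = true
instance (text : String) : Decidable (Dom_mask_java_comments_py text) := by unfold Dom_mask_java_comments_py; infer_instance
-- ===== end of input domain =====

-- B replaces A's five-boolean character-by-character state machine by a token scanner that
-- consumes whole string/char literals and whole comments in one step (objective: alternative).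

-- ===== PORT A =====
-- literal transliteration of A's while-loop: one step per character, five mode flags
def goA (instr inchar esc inline inblock : Bool) : List Char → List Char
  | [] => []
  | ch :: rest =>
    if inline then
      if ch = '\n' then ch :: goA instr inchar esc false inblock rest
      else ' ' :: goA instr inchar esc inline inblock rest
    else if inblock then
      if ch = '*' ∧ rest.head? = some '/' then
        ' ' :: ' ' :: goA instr inchar esc inline false rest.tail
      else
        (if ch ≠ '\n' then ' ' else ch) :: goA instr inchar esc inline inblock rest
    else if instr then
      if esc then ch :: goA instr inchar false inline inblock rest
      else if ch = '\\' then ch :: goA instr inchar true inline inblock rest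
      else if ch = '"' then ch :: goA false inchar esc inline inblock rest
      else ch :: goA instr inchar esc inline inblock rest
    else if inchar then
      if esc then ch :: goA instr inchar false inline inblock rest
      else if ch = '\\' then ch :: goA instr inchar true inline inblock rest
      else if ch = '\'' then ch :: goA instr false esc inline inblock rest
      else ch :: goA instr inchar esc inline inblock rest
    else if ch = '"' then ch :: goA true inchar esc inline inblock rest
    else if ch = '\'' then ch :: goA instr true esc inline inblock rest
    else if ch = '/' ∧ rest.head? = some '/' then
      ' ' :: ' ' :: goA instr inchar esc true inblock rest.tail
    else if ch = '/' ∧ rest.head? = some '*' then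
      ' ' :: ' ' :: goA instr inchar esc inline true rest.tail
    else ch :: goA instr inchar esc inline inblock rest
termination_by l => l.length
decreasing_by all_goals (simp [List.length_tail]; try omega)

def mask_java_comments_py (text : String) : String :=
  String.ofList (goA false false false false false text.toList)

-- ===== PORT B =====
-- _skip_literal: the literal's characters up to and including the closing quote (or all of
-- them if unterminated), together with the remaining text
def skipLit (q : Char) : List Char → List Char × List Char
  | [] => ([], [])
  | c :: rest =>
    if c = '\\' then
      match rest with
      | [] => ([c], [])
      | d :: rest' =>
        let p := skipLit q rest'
        (c :: d :: p.1, p.2)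
    else if c = q then ([c], rest)
    else
      let p := skipLit q rest
      (c :: p.1, p.2)

theorem skipLit_len (q : Char) (l : List Char) : (skipLit q l).2.length ≤ l.length := by
  induction l using skipLit.induct q with
  | case1 => simp [skipLit]
  | case2 => simp [skipLit]
  | case3 d rest' ih => simp [skipLit]; omega
  | case4 rest' h => rw [skipLit.eq_def]; simp [h]
  | case5 c rest' h1 h2 ih => rw [skipLit.eq_def]; simp [h1, h2]; omega

-- text.find('*/'): the segment up to and including the first "*/" (or all of the text),
-- together with the remaining text
def splitBlock : List Char → List Char × List Char
  | [] => ([], [])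
  | [c] => ([c], [])
  | c :: d :: rest =>
    if c = '*' ∧ d = '/' then ([c, d], rest)
    else
      let p := splitBlock (d :: rest)
      (c :: p.1, p.2)

theorem splitBlock_len (l : List Char) : (splitBlock l).2.length ≤ l.length := by
  induction l using splitBlock.induct with
  | case1 => simp [splitBlock]
  | case2 => simp [splitBlock]
  | case3 c d rest h => rw [splitBlock.eq_def]; simp [h]; omega
  | case4 c d rest h ih =>
      rw [splitBlock.eq_def]; simp only []
      split_ifs
      simp_all
      try omega

-- transliteration of Source B's main loop: one step per token
def maskB : List Char → List Char
  | [] => []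
  | c :: rest =>
    if c = '"' ∨ c = '\'' then
      let p := skipLit c rest
      c :: (p.1 ++ maskB p.2)
    else if c = '/' ∧ rest.head? = some '/' then
      ' ' :: ' ' ::
        ((rest.tail.takeWhile (· ≠ '\n')).map (fun _ => ' ') ++
          maskB (rest.tail.dropWhile (· ≠ '\n')))
    else if c = '/' ∧ rest.head? = some '*' then
      let p := splitBlock rest.tail
      ' ' :: ' ' :: (p.1.map (fun ch => if ch = '\n' then '\n' else ' ') ++ maskB p.2)
    else c :: maskB rest
termination_by l => l.length
decreasing_by
  · have := skipLit_len c rest; simp only [List.length_cons]; omega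
  · have h3 : (rest.tail.dropWhile (· ≠ '\n')).length ≤ rest.tail.length :=
      List.length_dropWhile_le _ _
    simp only [List.length_tail, List.length_cons] at h3 ⊢; omega
  · have := splitBlock_len rest.tail
    simp only [List.length_tail, List.length_cons] at this ⊢; omega
  · simp only [List.length_cons]; omega

def mask_java_comments_py_alt (text : String) : String :=
  String.ofList (maskB text.toList)

-- ===== PRECONDITION & SPEC =====
def Spec_mask_java_comments_py (text : String) (out : String) : Prop := out = mask_java_comments_py_alt text
instance (text : String) (out : String) : Decidable (Spec_mask_java_comments_py text out) := by unfold Spec_mask_java_comments_py; infer_instance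

-- ===== CLAIM (what is proved, stated in full; the proofs are below) =====
def Claim_equal_mask_java_comments_py : Prop := ∀ (text : String), Dom_mask_java_comments_py text → Spec_mask_java_comments_py text (mask_java_comments_py text)

-- ===== LEMMAS AND PROOFS =====

theorem goA_string (l : List Char) :
    goA true false false false false l =
      (skipLit '"' l).1 ++ goA false false false false false (skipLit '"' l).2 := by
  induction l using skipLit.induct '"' with
  | case1 => simp [goA, skipLit]
  | case2 => simp [goA, skipLit]
  | case3 d rest' ih => rw [skipLit.eq_def]; simp [goA, ih]
  | case4 rest' h => rw [skipLit.eq_def]; simp [goA, h]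
  | case5 c rest' h1 h2 ih => rw [skipLit.eq_def]; simp [goA, h1, h2, ih]

theorem goA_char (l : List Char) :
    goA false true false false false l =
      (skipLit '\'' l).1 ++ goA false false false false false (skipLit '\'' l).2 := by
  induction l using skipLit.induct '\'' with
  | case1 => simp [goA, skipLit]
  | case2 => simp [goA, skipLit]
  | case3 d rest' ih => rw [skipLit.eq_def]; simp [goA, ih]
  | case4 rest' h => rw [skipLit.eq_def]; simp [goA, h]
  | case5 c rest' h1 h2 ih => rw [skipLit.eq_def]; simp [goA, h1, h2, ih]

theorem goA_line (l : List Char) :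
    goA false false false true false l =
      (l.takeWhile (· ≠ '\n')).map (fun _ => ' ') ++
        goA false false false false false (l.dropWhile (· ≠ '\n')) := by
  induction l with
  | nil => simp [goA]
  | cons c rest ih =>
    by_cases h : c = '\n'
    · subst h; simp [goA]
    · simp [goA, h, ih]

theorem goA_block (l : List Char) :
    goA false false false false true l =
      (splitBlock l).1.map (fun ch => if ch = '\n' then '\n' else ' ') ++
        goA false false false false false (splitBlock l).2 := by
  induction l using splitBlock.induct with
  | case1 => simp [goA, splitBlock]
  | case2 c => rw [splitBlock.eq_def]; by_cases h : c = '\n' <;> simp [goA, h]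
  | case3 c d rest h => rw [splitBlock.eq_def]; simp [goA, h]
  | case4 c d rest h ih =>
      rw [splitBlock.eq_def]; simp [goA, h, ih]
      split_ifs <;> simp_all

theorem goA_eq_maskB (l : List Char) : goA false false false false false l = maskB l := by
  induction l using maskB.induct with
  | case1 => simp [goA, maskB]
  | case2 c rest h p ih =>
    rw [maskB.eq_def]; rcases h with h | h <;> subst h <;>
      (simp [goA, goA_string, goA_char]; exact ih)
  | case3 c rest h1 h2 ih =>
    obtain ⟨hc, hh⟩ := h2
    subst hc
    rw [maskB.eq_def]
    simp [goA, hh, goA_line]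
    simpa using ih
  | case4 c rest h1 h2 h3 p ih =>
    obtain ⟨hc, hh⟩ := h3
    subst hc
    rw [maskB.eq_def]
    simp [goA, hh, goA_block]
    exact ih
  | case5 c rest h1 h2 h3 ih =>
    rcases not_or.mp h1 with ⟨ha, hb⟩
    rw [maskB.eq_def]
    simp [goA, ha, hb, h2, h3, ih]

-- ===== VERDICT (by name: the statement is the Claim_ definition above) =====
theorem mask_java_comments_py_spec : Claim_equal_mask_java_comments_py := by
  intro text _
  unfold Spec_mask_java_comments_py mask_java_comments_py mask_java_comments_py_alt
  rw [goA_eq_maskB]
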